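-- pv_equiv track=rewrite | github.com/KasraKnanosys/2D-GBUILD | Polycrystal/Codes/NNFind_3.py | get_unique_polygons
-- ===== SOURCE A (Python) =====
-- def get_unique_polygons(polygons):
--     unique_polygons = []
--     normalized_polygon = []
--
--     for polygon in polygons:
--         if sorted(polygon[:-1]) not in normalized_polygon:
--             unique_polygons.append(polygon)
--             normalized_polygon.append(sorted(polygon[:-1]))
--
--     return unique_polygons
-- ===== SOURCE B (Python) =====
-- def get_unique_polygons(polygons):
--     # Decorate with (normalized key, original index), sort (lexicographic on
--     # (key, index)), scan once keeping the first pair of each key run (the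
--     # lowest original index), then restore original order by the index.
--     pairs = [(sorted(p[:-1]), i) for i, p in enumerate(polygons)]
--     pairs.sort()
--     survivors = []
--     prev = None
--     for key, i in pairs:
--         if key != prev:
--             survivors.append(i)
--             prev = key
--     survivors.sort()
--     return [polygons[i] for i in survivors]
-- ===== Notes on version B (the rewrite author's own statement) =====
-- stated objective: alternative
-- what changed: A scans polygons once while doing a linear membership search in a growing list of seen normalized keys; B instead decorates each polygon with (sorted key, original index), sorts the decorated pairs lexicographically, keeps the first pair of each equal-key run in one scan, and re-sorts the surviving indices to restore the original first-occurrence order.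
import Mathlib
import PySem

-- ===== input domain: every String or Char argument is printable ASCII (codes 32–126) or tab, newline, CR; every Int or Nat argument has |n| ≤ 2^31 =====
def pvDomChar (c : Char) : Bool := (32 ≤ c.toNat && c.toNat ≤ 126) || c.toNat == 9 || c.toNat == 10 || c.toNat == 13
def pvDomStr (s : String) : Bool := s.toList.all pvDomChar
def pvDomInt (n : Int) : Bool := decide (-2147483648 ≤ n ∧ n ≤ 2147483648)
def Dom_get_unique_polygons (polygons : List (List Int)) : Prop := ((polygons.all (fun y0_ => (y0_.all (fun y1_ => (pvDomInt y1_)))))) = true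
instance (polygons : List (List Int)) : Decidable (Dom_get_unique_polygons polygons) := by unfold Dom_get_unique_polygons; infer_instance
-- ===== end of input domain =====

-- B replaces A's scan-with-seen-list by decorate/sort/scan/resort (sort by (key, index),
-- keep the head of each key run, restore original order); return value proved identical.

-- sorted(polygon[:-1]), the normalization key both Pythons compute
def pvKey (polygon : List Int) : List Int :=
  PySem.List.sorted (PySem.List.slice polygon none (some (-1))) (fun x => x) false

-- ===== PORT A =====
def get_unique_polygons (polygons : List (List Int)) : List (List Int) :=
  (polygons.foldl
    (fun (st : List (List Int) × List (List Int)) polygon =>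
      if pvKey polygon ∈ st.2 then st
      else (st.1 ++ [polygon], st.2 ++ [pvKey polygon]))
    ([], [])).1

-- ===== PORT B =====
def get_unique_polygons_alt (polygons : List (List Int)) : List (List Int) :=
  let pairs : List (List Int × Int) :=
    (PySem.List.enumerate polygons).map (fun ip => (pvKey ip.2, ip.1))
  -- pairs.sort(): Python sorts the 2-tuples lexicographically = sorted2 by (fst, snd)
  let pairsS := PySem.List.sorted2 pairs (fun t => t.1) (fun t => t.2)
  let survivors :=
    (pairsS.foldl
      (fun (st : List Int × Option (List Int)) ki =>
        if st.2 ≠ some ki.1 then (st.1 ++ [ki.2], some ki.1) else st)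
      ([], none)).1
  (PySem.List.sorted survivors (fun x => x)).map
    (fun i => PySem.List.pyGetD polygons i [])

-- ===== PRECONDITION & SPEC =====
def Spec_get_unique_polygons (polygons : List (List Int)) (out : List (List Int)) : Prop := out = get_unique_polygons_alt polygons
instance (polygons : List (List Int)) (out : List (List Int)) : Decidable (Spec_get_unique_polygons polygons out) := by unfold Spec_get_unique_polygons; infer_instance

-- ===== CLAIM (what is proved, stated in full; the proofs are below) =====
def Claim_equal_get_unique_polygons : Prop := ∀ (polygons : List (List Int)), Dom_get_unique_polygons polygons → Spec_get_unique_polygons polygons (get_unique_polygons polygons)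

-- ===== LEMMAS AND PROOFS =====

-- canonical first-occurrence recursion, the meaning of A's loop
def pvC (seen : List (List Int)) : List (List Int) → List (List Int)
  | [] => []
  | p :: tl => if pvKey p ∈ seen then pvC (seen ++ [pvKey p]) tl
               else p :: pvC (seen ++ [pvKey p]) tl

-- key of the j-th polygon
def pvKeyAt (l : List (List Int)) (j : Nat) : List Int := pvKey (l.getD j [])

-- "position j is the first occurrence of its key"
def pvCnd (l : List (List Int)) (j : Nat) : Bool :=
  decide (∀ j' < j, pvKeyAt l j' ≠ pvKeyAt l j)

-- the strict lexicographic order Python uses on the (key, index) pairs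
def pvLt (a b : List Int × Int) : Prop := a.1 < b.1 ∨ (a.1 = b.1 ∧ a.2 < b.2)

def pvBef (a b : List Int × Int) : Bool :=
  decide (a.1 < b.1) || (!decide (b.1 < a.1) && decide (a.2 < b.2))

-- recursion computing B's scan loop
def pvScan (prev : Option (List Int)) : List (List Int × Int) → List Int
  | [] => []
  | ki :: tl => if prev = some ki.1 then pvScan prev tl
                else ki.2 :: pvScan (some ki.1) tl

theorem pvLt_iff_toLex (a b : List Int × Int) : pvLt a b ↔ toLex a < toLex b := by
  rw [Prod.Lex.lt_iff]; rfl

theorem pvBef_iff (a b : List Int × Int) : pvBef a b = true ↔ pvLt a b := by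
  unfold pvBef pvLt
  rcases lt_trichotomy a.1 b.1 with h | h | h
  · simp [h, lt_asymm h]
  · simp [h]
  · simp [h, lt_asymm h, ne_of_gt h]

theorem pvBef_false_of_lt (a b : List Int × Int) (h : pvLt a b) : pvBef b a = false := by
  rcases hb : pvBef b a with _ | _
  · rfl
  · exact absurd ((pvLt_iff_toLex a b).1 h) (not_lt.2 (le_of_lt ((pvLt_iff_toLex b a).1 ((pvBef_iff b a).1 hb))))

theorem pvBef_compl_trans (a b c : List Int × Int)
    (h1 : pvBef b a = false) (h2 : pvBef c b = false) : pvBef c a = false := by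
  rcases hb : pvBef c a with _ | _
  · rfl
  · exfalso
    have ha : ¬ pvLt b a := fun h => by rw [(pvBef_iff b a).2 h] at h1; cases h1
    have hbb : ¬ pvLt c b := fun h => by rw [(pvBef_iff c b).2 h] at h2; cases h2
    have hca := (pvLt_iff_toLex c a).1 ((pvBef_iff c a).1 hb)
    rw [pvLt_iff_toLex] at ha hbb
    exact absurd hca (not_lt.2 (le_trans (not_lt.1 ha) (not_lt.1 hbb)))

theorem pvInsert_pairwise (x : List Int × Int) (ys : List (List Int × Int))
    (h : ys.Pairwise (fun a b => pvBef b a = false)) :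
    (PySem.List.insertBy pvBef x ys).Pairwise (fun a b => pvBef b a = false) := by
  induction ys with
  | nil => simp [PySem.List.insertBy]
  | cons y ys ih =>
    rcases List.pairwise_cons.1 h with ⟨hy, hys⟩
    by_cases hb : pvBef x y = true
    · simp only [PySem.List.insertBy, hb, if_pos]
      refine List.pairwise_cons.2 ⟨?_, h⟩
      intro z hz
      rcases List.mem_cons.1 hz with rfl | hz
      · exact pvBef_false_of_lt x z ((pvBef_iff x z).1 hb)
      · exact pvBef_compl_trans x y z (pvBef_false_of_lt x y ((pvBef_iff x y).1 hb)) (hy _ hz)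
    · simp only [PySem.List.insertBy, hb, if_neg, Bool.not_eq_true]
      refine List.pairwise_cons.2 ⟨?_, ih hys⟩
      intro z hz
      rcases (PySem.List.mem_insertBy pvBef x z ys).1 hz with hz | hz
      · subst hz
        simp only [Bool.not_eq_true] at hb
        exact hb
      · exact hy _ hz

theorem pvSorted2_pairwise (xs : List (List Int × Int)) :
    (PySem.List.sorted2 xs (fun t => t.1) (fun t => t.2)).Pairwise (fun a b => pvBef b a = false) := by
  have : PySem.List.sorted2 xs (fun t => t.1) (fun t => t.2)
      = xs.foldl (fun acc x => PySem.List.insertBy pvBef x acc) [] := rfl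
  rw [this]
  have H : ∀ (l : List (List Int × Int)) (acc : List (List Int × Int)),
      acc.Pairwise (fun a b => pvBef b a = false) →
      (l.foldl (fun acc x => PySem.List.insertBy pvBef x acc) acc).Pairwise
        (fun a b => pvBef b a = false) := by
    intro l
    induction l with
    | nil => intro acc h; exact h
    | cons x tl ih => intro acc h; exact ih _ (pvInsert_pairwise x acc h)
  exact H xs [] (by simp)

-- strict pairwise once the elements are distinct
theorem pvPairwise_lt_of_nodup (D : List (List Int × Int))
    (hnd : D.Nodup) (hp : D.Pairwise (fun a b => pvBef b a = false)) :
    D.Pairwise pvLt := by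
  have := List.Pairwise.and hnd hp
  refine this.imp ?_
  intro a b ⟨hne, hb⟩
  rw [pvLt_iff_toLex]
  have hle : toLex a ≤ toLex b := by
    by_contra hlt
    rw [(pvBef_iff b a).2 ((pvLt_iff_toLex b a).2 (not_le.1 hlt))] at hb
    cases hb
  exact lt_of_le_of_ne hle (fun he => hne (by
    have : a = b := by
      have := congrArg ofLex he
      simpa using this
    exact this))

-- B's foldl scan loop is pvScan
theorem pvFoldl_scan (L : List (List Int × Int)) :
    ∀ (s : List Int) (prev : Option (List Int)),
    (L.foldl
      (fun (st : List Int × Option (List Int)) ki =>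
        if st.2 ≠ some ki.1 then (st.1 ++ [ki.2], some ki.1) else st) (s, prev)).1
    = s ++ pvScan prev L := by
  induction L with
  | nil => intro s prev; simp [pvScan]
  | cons ki tl ih =>
    intro s prev
    simp only [List.foldl_cons]
    by_cases h : prev = some ki.1
    · rw [if_neg (not_not_intro h)]
      simp only [pvScan, if_pos h]
      exact ih s prev
    · rw [if_pos h]
      rw [ih (s ++ [ki.2]) (some ki.1)]
      simp only [pvScan, if_neg h]
      simp

theorem pvScan_sublist (L : List (List Int × Int)) :
    ∀ prev, (pvScan prev L).Sublist (L.map (·.2)) := by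
  induction L with
  | nil => intro prev; simp [pvScan]
  | cons ki tl ih =>
    intro prev
    by_cases h : prev = some ki.1
    · subst h
      rw [show pvScan (some ki.1) (ki :: tl) = pvScan (some ki.1) tl from by
        simp [pvScan], List.map_cons]
      exact (ih (some ki.1)).cons _
    · rw [show pvScan prev (ki :: tl) = ki.2 :: pvScan (some ki.1) tl from by
        simp [pvScan, h], List.map_cons]
      exact (ih (some ki.1)).cons₂ _

-- membership in the scan of a strictly sorted list: exactly the least index of each key
theorem pvScan_mem (L : List (List Int × Int)) (hp : L.Pairwise pvLt) :
    ∀ (prev : Option (List Int)),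
    (∀ p ∈ L, ∀ k0, prev = some k0 → k0 ≤ p.1) →
    ∀ i : Int, (i ∈ pvScan prev L ↔
      ∃ k, (k, i) ∈ L ∧ prev ≠ some k ∧ ∀ p ∈ L, p.1 = k → i ≤ p.2) := by
  induction L with
  | nil => intro prev _ i; simp [pvScan]
  | cons ki tl ih =>
    rcases List.pairwise_cons.1 hp with ⟨hki, htl⟩
    intro prev hprev i
    have hprev_tl : ∀ p ∈ tl, ∀ k0, prev = some k0 → k0 ≤ p.1 :=
      fun p hpm k0 hk0 => hprev p (List.mem_cons_of_mem _ hpm) k0 hk0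
    by_cases h : prev = some ki.1
    · subst h
      rw [show pvScan (some ki.1) (ki :: tl) = pvScan (some ki.1) tl from by simp [pvScan]]
      rw [ih htl (some ki.1) hprev_tl i]
      constructor
      · rintro ⟨k, hmem, hne, hmin⟩
        refine ⟨k, List.mem_cons_of_mem _ hmem, hne, ?_⟩
        intro p hpm hpk
        rcases List.mem_cons.1 hpm with hpm | hpm
        · exfalso; subst hpm; exact hne (congrArg some hpk)
        · exact hmin p hpm hpk
      · rintro ⟨k, hmem, hne, hmin⟩
        rcases List.mem_cons.1 hmem with hmem | hmem
        · exfalso; exact hne (by rw [← hmem])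
        · exact ⟨k, hmem, hne, fun p hpm hpk => hmin p (List.mem_cons_of_mem _ hpm) hpk⟩
    · have hunf : pvScan prev (ki :: tl) = ki.2 :: pvScan (some ki.1) tl := by
        simp [pvScan, h]
      have htl_inv : ∀ p ∈ tl, ∀ k0, some ki.1 = some k0 → k0 ≤ p.1 := by
        intro p hpm k0 hk0
        have := hki p hpm
        rcases this with hlt | ⟨heq, _⟩
        · exact (Option.some.inj hk0) ▸ le_of_lt hlt
        · exact (Option.some.inj hk0) ▸ le_of_eq heq
      rw [hunf, List.mem_cons, ih htl (some ki.1) htl_inv i]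
      constructor
      · rintro (rfl | ⟨k, hmem, hne, hmin⟩)
        · refine ⟨ki.1, List.mem_cons.2 (Or.inl rfl), h, ?_⟩
          intro p hpm hpk
          rcases List.mem_cons.1 hpm with hpm | hpm
          · exact le_of_eq (by rw [hpm])
          · rcases hki p hpm with hlt | ⟨_, hlt⟩
            · exact absurd hpk (ne_of_gt hlt)
            · exact le_of_lt hlt
        · -- a survivor of the tail
          have hk_ne : k ≠ ki.1 := fun he => hne (by rw [he])
          have hprev_ne : prev ≠ some k := by
            intro he
            have h1 : k ≤ ki.1 := hprev ki (List.mem_cons.2 (Or.inl rfl)) k he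
            have h2 : ki.1 ≤ k := by
              rcases hki (k, i) hmem with hlt | ⟨heq, _⟩
              · exact le_of_lt hlt
              · exact le_of_eq heq
            exact hk_ne (le_antisymm h1 h2)
          refine ⟨k, List.mem_cons_of_mem _ hmem, hprev_ne, ?_⟩
          intro p hpm hpk
          rcases List.mem_cons.1 hpm with hpm | hpm
          · exfalso; apply hk_ne; rw [← hpk, hpm]
          · exact hmin p hpm hpk
      · rintro ⟨k, hmem, hne, hmin⟩
        rcases List.mem_cons.1 hmem with hmem | hmem
        · left; exact congrArg Prod.snd hmem
        · by_cases hk : k = ki.1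
          · exfalso
            have h1 : i ≤ ki.2 := hmin ki (List.mem_cons.2 (Or.inl rfl)) hk.symm
            rcases hki (k, i) hmem with hlt | ⟨_, hlt⟩
            · exact (ne_of_gt hlt) hk
            · exact absurd h1 (not_le.2 hlt)
          · right
            exact ⟨k, hmem, fun he => hk (Option.some.inj he).symm,
               fun p hpm hpk => hmin p (List.mem_cons_of_mem _ hpm) hpk⟩

-- the decorated pair list, in index form
theorem pvPairs_eq (l : List (List Int)) :
    (PySem.List.enumerate l).map (fun ip => (pvKey ip.2, ip.1))
      = (List.range l.length).map (fun j => (pvKeyAt l j, (j : Int))) := by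
  have H : ∀ (l : List (List Int)) (s : Int),
      (PySem.List.enumerate l s).map (fun ip => (pvKey ip.2, ip.1))
        = (List.range l.length).map (fun j => (pvKeyAt l j, s + (j : Int))) := by
    intro l
    induction l with
    | nil => intro s; simp [PySem.List.enumerate_nil]
    | cons p tl ih =>
      intro s
      rw [PySem.List.enumerate_cons, List.map_cons, ih (s + 1),
        List.length_cons, List.range_succ_eq_map, List.map_cons, List.map_map]
      refine congrArg₂ _ (by simp [pvKeyAt]) ?_
      refine List.map_congr_left ?_
      intro j _
      simp only [Function.comp_apply, pvKeyAt, List.getD_cons_succ, Nat.succ_eq_add_one]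
      refine congrArg _ ?_
      push_cast
      ring
  rw [H l 0]
  refine List.map_congr_left ?_
  intro j _
  simp

-- A's loop is pvC (membership through any seen list with the same members)
theorem pvA_eq_pvC (l : List (List Int)) :
    ∀ (acc seen seen' : List (List Int)), (∀ k, k ∈ seen ↔ k ∈ seen') →
    (l.foldl
      (fun (st : List (List Int) × List (List Int)) polygon =>
        if pvKey polygon ∈ st.2 then st
        else (st.1 ++ [polygon], st.2 ++ [pvKey polygon])) (acc, seen)).1
      = acc ++ pvC seen' l := by
  induction l with
  | nil => intro acc seen seen' _; simp [pvC]
  | cons p tl ih =>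
    intro acc seen seen' h
    by_cases hp : pvKey p ∈ seen
    · have hp' : pvKey p ∈ seen' := (h _).1 hp
      simp only [List.foldl_cons, hp, if_pos, pvC, hp']
      refine ih acc seen (seen' ++ [pvKey p]) ?_
      intro k
      rw [h k]
      constructor
      · intro hk; exact List.mem_append.2 (Or.inl hk)
      · intro hk
        rcases List.mem_append.1 hk with hk | hk
        · exact hk
        · rw [List.mem_singleton.1 hk]; exact hp'
    · have hp' : pvKey p ∉ seen' := fun hx => hp ((h _).2 hx)
      simp only [List.foldl_cons, hp, if_neg, pvC, hp', not_false_iff]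
      rw [ih (acc ++ [p]) (seen ++ [pvKey p]) (seen' ++ [pvKey p]) (by
        intro k; simp only [List.mem_append, List.mem_singleton, h k])]
      simp

-- pvC as a filter of first-occurrence positions
theorem pvC_eq_canon (l : List (List Int)) :
    ∀ seen : List (List Int),
    pvC seen l
      = ((List.range l.length).filter
          (fun j => decide (pvKeyAt l j ∉ seen) && pvCnd l j)).map (fun j => l.getD j []) := by
  induction l with
  | nil => intro seen; simp [pvC]
  | cons p tl ih =>
    intro seen
    rw [List.length_cons, List.range_succ_eq_map, List.filter_cons]
    have hshift : ∀ j : Nat,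
        (decide (pvKeyAt (p :: tl) (j + 1) ∉ seen) && pvCnd (p :: tl) (j + 1))
          = (decide (pvKeyAt tl j ∉ (seen ++ [pvKey p])) && pvCnd tl j) := by
      intro j
      have hkey : pvKeyAt (p :: tl) (j + 1) = pvKeyAt tl j := by
        simp [pvKeyAt]
      have hcnd : pvCnd (p :: tl) (j + 1)
          = (decide (pvKey p ≠ pvKeyAt tl j) && pvCnd tl j) := by
        unfold pvCnd
        rw [← Bool.decide_and]
        refine decide_eq_decide.2 ?_
        rw [hkey]
        constructor
        · intro h
          refine ⟨by simpa [pvKeyAt] using h 0 (Nat.succ_pos _), ?_⟩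
          intro j' hj'
          have := h (j' + 1) (by omega)
          simpa [pvKeyAt] using this
        · rintro ⟨h0, hr⟩ j' hj'
          match j' with
          | 0 => simpa [pvKeyAt] using h0
          | (j'' + 1) =>
            have := hr j'' (by omega)
            simpa [pvKeyAt] using this
      have hmem : (pvKeyAt tl j ∉ seen ++ [pvKey p])
          ↔ (pvKeyAt tl j ∉ seen ∧ pvKey p ≠ pvKeyAt tl j) := by
        simp only [List.mem_append, List.mem_singleton]
        constructor
        · intro h; exact ⟨fun hx => h (Or.inl hx), fun hx => h (Or.inr hx.symm)⟩
        · intro ⟨h1, h2⟩ hx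
          rcases hx with hx | hx
          · exact h1 hx
          · exact h2 hx.symm
      rw [hkey, hcnd]
      have hd : decide (pvKeyAt tl j ∉ seen ++ [pvKey p])
          = (decide (pvKeyAt tl j ∉ seen) && decide (pvKey p ≠ pvKeyAt tl j)) := by
        rw [← Bool.decide_and]
        exact decide_eq_decide.2 hmem
      rw [hd, Bool.and_assoc]
    have hfc : ((List.range tl.length).filter
        ((fun j => decide (pvKeyAt (p :: tl) j ∉ seen) && pvCnd (p :: tl) j) ∘ Nat.succ))
        = ((List.range tl.length).filter
          (fun j => decide (pvKeyAt tl j ∉ (seen ++ [pvKey p])) && pvCnd tl j)) := by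
      refine List.filter_congr ?_
      intro j _
      simpa using hshift j
    by_cases hp : pvKey p ∈ seen
    · have hcond : (decide (pvKeyAt (p :: tl) 0 ∉ seen) && pvCnd (p :: tl) 0) = false := by
        simp [pvKeyAt, pvCnd, hp]
      rw [hcond, if_neg (by simp)]
      rw [List.filter_map, hfc, List.map_map]
      simp only [pvC, hp, if_pos]
      rw [ih (seen ++ [pvKey p])]
      refine List.map_congr_left ?_
      intro j _
      simp
    · have hcond : (decide (pvKeyAt (p :: tl) 0 ∉ seen) && pvCnd (p :: tl) 0) = true := by
        simp [pvKeyAt, pvCnd, hp]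
      rw [hcond, if_pos rfl]
      rw [List.filter_map, hfc, List.map_cons, List.map_map]
      simp only [pvC, hp, if_neg, not_false_iff]
      refine congrArg₂ _ (by simp) ?_
      rw [ih (seen ++ [pvKey p])]
      refine List.map_congr_left ?_
      intro j _
      simp

-- the ascending list of first-occurrence indices
def pvF (l : List (List Int)) : List Int :=
  ((List.range l.length).filter (pvCnd l)).map (fun j => Int.ofNat j)

theorem pvF_nodup (l : List (List Int)) : (pvF l).Nodup := by
  unfold pvF
  refine List.Nodup.map ?_ (List.Nodup.filter _ List.nodup_range)
  intro a b h
  exact Int.ofNat.inj h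

theorem pvF_pairwise (l : List (List Int)) : (pvF l).Pairwise (· ≤ ·) := by
  unfold pvF
  refine List.Pairwise.map _ ?_ (List.Pairwise.filter _ List.pairwise_lt_range)
  intro a b h
  exact Int.ofNat_le.2 (le_of_lt h)

theorem pvF_mem (l : List (List Int)) (i : Int) :
    i ∈ pvF l ↔ ∃ j : Nat, j < l.length ∧ pvCnd l j = true ∧ (j : Int) = i := by
  unfold pvF
  simp only [List.mem_map, List.mem_filter, List.mem_range]
  constructor
  · rintro ⟨j, ⟨hj, hc⟩, rfl⟩; exact ⟨j, hj, hc, rfl⟩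
  · rintro ⟨j, hj, hc, rfl⟩; exact ⟨j, ⟨hj, hc⟩, rfl⟩

-- ===== VERDICT (by name: the statement is the Claim_ definition above) =====
theorem get_unique_polygons_spec : Claim_equal_get_unique_polygons := by
  intro polygons _
  unfold Spec_get_unique_polygons
  set n := polygons.length with hn
  -- A's side
  have hA : get_unique_polygons polygons
      = ((List.range n).filter (pvCnd polygons)).map (fun j => polygons.getD j []) := by
    unfold get_unique_polygons
    rw [pvA_eq_pvC polygons [] [] [] (by intro k; rfl), List.nil_append,
      pvC_eq_canon polygons []]
    refine congrArg _ (List.filter_congr ?_)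
    intro j _
    simp
  -- B's side
  have hP := pvPairs_eq polygons
  set P : List (List Int × Int) := (List.range n).map (fun j => (pvKeyAt polygons j, (j : Int))) with hPdef
  set D : List (List Int × Int) := PySem.List.sorted2 P (fun t => t.1) (fun t => t.2) with hD
  have hDperm : D.Perm P := PySem.List.sorted2_perm P _ _ false
  have hPsnd_nodup : (P.map (·.2)).Nodup := by
    rw [hPdef, List.map_map]
    exact (List.nodup_range).map (fun a b h => by simpa using h)
  have hPnodup : P.Nodup := List.Nodup.of_map _ hPsnd_nodup
  have hDnodup : D.Nodup := hDperm.nodup_iff.2 hPnodup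
  have hDlt : D.Pairwise pvLt :=
    pvPairwise_lt_of_nodup D hDnodup (pvSorted2_pairwise P)
  have hDsnd_nodup : (D.map (·.2)).Nodup := (hDperm.map (·.2)).nodup_iff.2 hPsnd_nodup
  -- the survivors
  set S : List Int := pvScan none D with hS
  have hSnodup : S.Nodup := (pvScan_sublist D none).nodup hDsnd_nodup
  have hmemP : ∀ (k : List Int) (i : Int),
      ((k, i) ∈ P ↔ ∃ j : Nat, j < n ∧ pvKeyAt polygons j = k ∧ (j : Int) = i) := by
    intro k i
    rw [hPdef]
    simp only [List.mem_map, List.mem_range, Prod.mk.injEq]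
  have hSmem : ∀ i : Int, i ∈ S ↔ i ∈ pvF polygons := by
    intro i
    rw [hS, pvScan_mem D hDlt none (by intro p _ k0 h; cases h) i, pvF_mem]
    constructor
    · rintro ⟨k, hmem, _, hmin⟩
      obtain ⟨j, hj, hk, hi⟩ := (hmemP k i).1 (hDperm.mem_iff.1 hmem)
      refine ⟨j, hj, ?_, hi⟩
      unfold pvCnd
      refine decide_eq_true ?_
      intro j' hj' he
      have hmem' : (pvKeyAt polygons j', (j' : Int)) ∈ D :=
        hDperm.mem_iff.2 ((hmemP _ _).2 ⟨j', by omega, rfl, rfl⟩)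
      have := hmin _ hmem' (by rw [he, hk])
      rw [← hi] at this
      simp only at this
      omega
    · rintro ⟨j, hj, hc, rfl⟩
      refine ⟨pvKeyAt polygons j,
        hDperm.mem_iff.2 ((hmemP _ _).2 ⟨j, hj, rfl, rfl⟩),
        by simp, ?_⟩
      intro p hpm hpk
      obtain ⟨j', hj', hk', hi'⟩ := (hmemP p.1 p.2).1 (hDperm.mem_iff.1 (by
        have : p = (p.1, p.2) := rfl
        rw [← this]; exact hpm))
      have := of_decide_eq_true hc
      have hnot : ¬ j' < j := fun hlt => this j' hlt (by rw [hk', hpk])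
      rw [← hi']
      exact_mod_cast Nat.le_of_not_lt hnot
  have hSsorted : PySem.List.sorted S (fun x => x) = pvF polygons := by
    refine PySem.List.sorted_id_eq_of_perm_of_pairwise S (pvF polygons) ?_ (pvF_pairwise polygons)
    exact (List.perm_ext_iff_of_nodup (pvF_nodup polygons) hSnodup).2
      (fun a => ((hSmem a).symm))
  -- assemble B
  have hB : get_unique_polygons_alt polygons
      = ((List.range n).filter (pvCnd polygons)).map (fun j => polygons.getD j []) := by
    unfold get_unique_polygons_alt
    simp only
    rw [hP, ← hD, pvFoldl_scan D [] none, List.nil_append, ← hS, hSsorted]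
    unfold pvF
    rw [List.map_map]
    refine List.map_congr_left ?_
    intro j _
    simp
  rw [hA, hB]
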